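-- pv_equiv track=rewrite | github.com/jms7446/hackerrank | baekjoon/alg-study/w23/p16234.py | movement_population
-- ===== SOURCE A (Python) =====
-- from itertools import product, count
--
-- class Direction:
--     def __init__(self, dir_type, R, C):
--         if dir_type == 4:
--             self.directions = [(0, 1), (1, 0), (0, -1), (-1, 0)]
--         else:
--             raise Exception(f'Unknown dir_type: {dir_type}')
--         self.R = R
--         self.C = C
--
--     def iter_next(self, point):
--         pr, pc = point
--         for dr, dc in self.directions:
--             r, c = pr + dr, pc + dc
--             if 0 <= r < self.R and 0 <= c < self.C:
--                 yield r, c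
--
-- def movement_population(N, L, R, grid):
--     def get_population(state):
--         return grid[state[0]][state[1]]
--
--     def set_population(state, p):
--         grid[state[0]][state[1]] = p
--
--     def union_with(start_state):
--         stack = [start_state]
--         visited.add(start_state)
--         union = {start_state}
--         union_population = get_population(start_state)
--         while stack:
--             cur_state = stack.pop()
--             cur_population = get_population(cur_state)
--             for neighbor_state in direction.iter_next(cur_state):
--                 neighbor_population = get_population(neighbor_state)
--                 if neighbor_state not in visited and L <= abs(neighbor_population - cur_population) <= R:
--                     visited.add(neighbor_state)
--                     union.add(neighbor_state)
--                     union_population += neighbor_population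
--                     stack.append(neighbor_state)
--
--         avg_population = union_population // len(union)
--         for state in union:
--             set_population(state, avg_population)
--         return len(union) > 1
--
--     population_moved = False
--     direction = Direction(4, N, N)
--     visited = set()
--     for state in product(range(N), range(N)):
--         if state not in visited:
--             population_moved = union_with(state) or population_moved
--
--     return population_moved
-- ===== SOURCE B (Python) =====
-- def movement_population(N, L, R, grid):
--     for i in range(N):
--         for j in range(N):
--             v = grid[i][j]
--             if j + 1 < N and L <= abs(grid[i][j + 1] - v) <= R:
--                 return True
--             if i + 1 < N and L <= abs(grid[i + 1][j] - v) <= R: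
--                 return True
--     return False
-- ===== Notes on version B (the rewrite author's own statement) =====
-- stated objective: simpler
-- what changed: The DFS flood fill with visited/union sets is replaced by a single early-exit scan over right/down neighbour pairs: the returned Bool is exactly 'some 4-adjacent pair has L <= |diff| <= R', so no sets, stacks or component traversal are needed (A's in-place write-back of component averages to grid is a side effect only; the claim is about the return value).
import Mathlib
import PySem

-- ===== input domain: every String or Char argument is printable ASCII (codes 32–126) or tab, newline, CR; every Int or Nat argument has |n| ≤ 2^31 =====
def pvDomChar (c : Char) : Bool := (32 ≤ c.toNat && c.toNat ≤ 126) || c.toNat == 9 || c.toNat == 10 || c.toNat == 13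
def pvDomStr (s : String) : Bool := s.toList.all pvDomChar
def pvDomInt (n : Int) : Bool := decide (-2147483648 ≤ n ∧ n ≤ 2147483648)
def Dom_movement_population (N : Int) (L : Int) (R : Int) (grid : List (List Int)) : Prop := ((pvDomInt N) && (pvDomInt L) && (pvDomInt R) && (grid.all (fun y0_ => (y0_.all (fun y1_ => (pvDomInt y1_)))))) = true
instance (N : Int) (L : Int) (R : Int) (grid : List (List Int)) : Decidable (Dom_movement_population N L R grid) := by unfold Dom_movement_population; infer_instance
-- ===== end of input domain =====

-- B replaces the DFS flood fill by a single early-exit scan over right/down neighbour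
-- pairs: the returned Bool is exactly "some 4-adjacent pair has L <= |diff| <= R".
-- A mutates `grid` in place (writes component averages back); B does not — the
-- equivalence proved here is about the RETURN value only.


-- ===== PORT A =====
-- Direction(4, N, N).directions
def pvDirs : List (Int × Int) := [(0, 1), (1, 0), (0, -1), (-1, 0)]

-- Direction.iter_next: the in-bounds neighbours of a point, in direction order
def pvIterNext (N : Int) (s : Int × Int) : List (Int × Int) :=
  pvDirs.filterMap (fun d =>
    if 0 ≤ s.1 + d.1 ∧ s.1 + d.1 < N ∧ 0 ≤ s.2 + d.2 ∧ s.2 + d.2 < N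
    then some (s.1 + d.1, s.2 + d.2) else none)

-- get_population (total under Pre_: every index read is in range)
def pvGetPop (grid : List (List Int)) (s : Int × Int) : Int :=
  PySem.List.pyGetD (PySem.List.pyGetD grid s.1 []) s.2 0

-- L <= abs(neighbor_population - cur_population) <= R
def pvQual (L R cur nb : Int) : Bool := decide (L ≤ |nb - cur| ∧ |nb - cur| ≤ R)

-- product(range(N), range(N))
def pvProduct (N : Int) : List (Int × Int) :=
  (PySem.List.pyRange 0 N 1).flatMap (fun i =>
    (PySem.List.pyRange 0 N 1).map (fun j => ((i, j) : Int × Int)))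

-- one iteration of the inner `for neighbor_state in direction.iter_next(cur_state)` body;
-- state = (stack, visited, union, union_population)
def pvStep (L R : Int) (grid : List (List Int)) (curPop : Int)
    (st : List (Int × Int) × PySem.Set (Int × Int) × PySem.Set (Int × Int) × Int)
    (nb : Int × Int) :
    List (Int × Int) × PySem.Set (Int × Int) × PySem.Set (Int × Int) × Int :=
  let nbPop := pvGetPop grid nb
  if !(PySem.Set.contains st.2.1 nb) && pvQual L R curPop nbPop then
    (st.1 ++ [nb], PySem.Set.add st.2.1 nb, PySem.Set.add st.2.2.1 nb, st.2.2.2 + nbPop)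
  else st

-- termination measure for the `while stack:` loop
def pvMu (N : Int) (stack visited : List (Int × Int)) : Nat :=
  2 * (pvProduct N).countP (fun c => decide (c ∉ visited)) + stack.length

-- termination lemma for pvDfs (cited in its decreasing_by)
theorem pvFold_mu (N L R : Int) (grid : List (List Int)) (curPop : Int) :
    ∀ (l : List (Int × Int)), (∀ x ∈ l, x ∈ pvProduct N) →
    ∀ st, pvMu N (l.foldl (pvStep L R grid curPop) st).1 (l.foldl (pvStep L R grid curPop) st).2.1
          ≤ pvMu N st.1 st.2.1 := by
  intro l
  induction l with
  | nil => intro _ st; exact le_refl _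
  | cons a l ih =>
    intro hl st
    rw [List.foldl_cons]
    refine le_trans (ih (fun x hx => hl x (List.mem_cons_of_mem a hx)) _) ?_
    show pvMu N (pvStep L R grid curPop st a).1 (pvStep L R grid curPop st a).2.1
      ≤ pvMu N st.1 st.2.1
    unfold pvStep
    simp only []
    split
    · next hg =>
      have hna : a ∉ st.2.1 := by
        intro hmem
        simp [hmem] at hg
      rw [PySem.Set.add_of_not_mem hna]
      have key : ∀ (P : List (Int × Int)), a ∈ P →
          P.countP (fun c => decide (c ∉ st.2.1 ++ [a])) <
          P.countP (fun c => decide (c ∉ st.2.1)) := by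
        intro P hP
        induction P with
        | nil => cases hP
        | cons x xs ih2 =>
          have hmono : xs.countP (fun c => decide (c ∉ st.2.1 ++ [a])) ≤
              xs.countP (fun c => decide (c ∉ st.2.1)) := by
            refine List.countP_mono_left ?_
            intro c _ hc
            simp only [decide_eq_true_eq, List.mem_append] at hc ⊢
            exact fun hm => hc (Or.inl hm)
          simp only [List.countP_cons]
          rcases List.mem_cons.mp hP with rfl | hP'
          · have e1 : (if (decide (a ∉ st.2.1 ++ [a])) = true then 1 else 0) = 0 := by simp
            have e2 : (if (decide (a ∉ st.2.1)) = true then 1 else 0) = 1 := by simp [hna]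
            rw [e1, e2]
            omega
          · have hlt := ih2 hP'
            by_cases hx1 : x ∈ st.2.1 ++ [a]
            · have e1 : (if (decide (x ∉ st.2.1 ++ [a])) = true then 1 else 0) = 0 := by
                simp [hx1]
              by_cases hx2 : x ∈ st.2.1
              · have e2 : (if (decide (x ∉ st.2.1)) = true then 1 else 0) = 0 := by simp [hx2]
                rw [e1, e2]
                omega
              · have e2 : (if (decide (x ∉ st.2.1)) = true then 1 else 0) = 1 := by simp [hx2]
                rw [e1, e2]
                omega
            · have hx2 : x ∉ st.2.1 := fun hm => hx1 (List.mem_append.mpr (Or.inl hm))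
              have e1 : (if (decide (x ∉ st.2.1 ++ [a])) = true then 1 else 0) = 1 := by
                simp [hx1]
              have e2 : (if (decide (x ∉ st.2.1)) = true then 1 else 0) = 1 := by simp [hx2]
              rw [e1, e2]
              omega
      have hkey := key (pvProduct N) (hl a List.mem_cons_self)
      unfold pvMu
      simp only [List.length_append, List.length_cons, List.length_nil]
      omega
    · exact le_refl _

-- the `while stack:` loop of union_with (stack.pop() pops the LAST element)
def pvDfs (N L R : Int) (grid : List (List Int))
    (stack : List (Int × Int)) (visited union : PySem.Set (Int × Int)) (upop : Int) :
    PySem.Set (Int × Int) × PySem.Set (Int × Int) × Int :=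
  if h : stack = [] then (visited, union, upop)
  else
    let cur := stack.getLast h
    let rest := stack.dropLast
    let curPop := pvGetPop grid cur
    let st := (pvIterNext N cur).foldl (pvStep L R grid curPop) (rest, visited, union, upop)
    pvDfs N L R grid st.1 st.2.1 st.2.2.1 st.2.2.2
termination_by pvMu N stack visited
decreasing_by
  have hsub : ∀ x ∈ pvIterNext N cur, x ∈ pvProduct N := by
    intro x hx
    simp only [pvIterNext, pvDirs, List.mem_filterMap] at hx
    obtain ⟨d, _, hd⟩ := hx
    split at hd
    · cases hd
      simp only [pvProduct, List.mem_flatMap, List.mem_map, PySem.List.mem_pyRange_one]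
      exact ⟨_, by omega, _, by omega, rfl⟩
    · cases hd
  have hmu := pvFold_mu N L R grid curPop (pvIterNext N cur) hsub (rest, visited, union, upop)
  have hlen : rest.length + 1 = stack.length := by
    have hpos : 0 < stack.length := List.length_pos_iff.mpr h
    simp only [rest, List.length_dropLast]
    omega
  calc pvMu N st.1 st.2.1 ≤ pvMu N rest visited := hmu
    _ < pvMu N stack visited := by unfold pvMu; omega

-- union_with(start_state): returns (visited after, len(union) > 1); the average
-- write-back (set_population) is omitted: it only mutates `grid` in place and never
-- influences the returned Bool (the equivalence claimed is about the return value)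
def pvUnionWith (N L R : Int) (grid : List (List Int))
    (visited : PySem.Set (Int × Int)) (start : Int × Int) :
    PySem.Set (Int × Int) × Bool :=
  let visited' := PySem.Set.add visited start
  let r := pvDfs N L R grid [start] visited' (PySem.Set.ofList [start]) (pvGetPop grid start)
  (r.1, decide (1 < r.2.1.length))

def movement_population (N : Int) (L : Int) (R : Int) (grid : List (List Int)) : Bool :=
  ((pvProduct N).foldl
    (fun (st : PySem.Set (Int × Int) × Bool) s =>
      if !(PySem.Set.contains st.1 s) then
        let r := pvUnionWith N L R grid st.1 s
        (r.1, r.2 || st.2)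
      else st)
    (PySem.Set.empty, false)).2

-- ===== PORT B =====
def pvBCell (grid : List (List Int)) (i j : Int) : Int :=
  PySem.List.pyGetD (PySem.List.pyGetD grid i []) j 0

def movement_population_alt (N : Int) (L : Int) (R : Int) (grid : List (List Int)) : Bool :=
  (PySem.List.pyRange 0 N 1).any (fun i =>
    (PySem.List.pyRange 0 N 1).any (fun j =>
      let v := pvBCell grid i j
      (decide (j + 1 < N) &&
        decide (L ≤ |pvBCell grid i (j + 1) - v| ∧ |pvBCell grid i (j + 1) - v| ≤ R)) ||
      (decide (i + 1 < N) &&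
        decide (L ≤ |pvBCell grid (i + 1) j - v| ∧ |pvBCell grid (i + 1) j - v| ≤ R))))

-- ===== PRECONDITION & SPEC =====
-- Pre_ excludes exactly the inputs on which A raises IndexError: when 0 < N, A reads
-- grid[i][j] for every 0 ≤ i, j < N, so grid needs at least N rows of length ≥ N each.
def Pre_movement_population (N : Int) (L : Int) (R : Int) (grid : List (List Int)) : Prop :=
  N ≤ (grid.length : Int) ∧ ∀ row ∈ grid.take N.toNat, N ≤ (row.length : Int)
instance (N : Int) (L : Int) (R : Int) (grid : List (List Int)) : Decidable (Pre_movement_population N L R grid) := by unfold Pre_movement_population; infer_instance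

def pvWitness_movement_population : Int × Int × Int × List (List Int) :=
  (2, 1, 3, [[1, 2], [10, 20]])

def Spec_movement_population (N : Int) (L : Int) (R : Int) (grid : List (List Int)) (out : Bool) : Prop := out = movement_population_alt N L R grid
instance (N : Int) (L : Int) (R : Int) (grid : List (List Int)) (out : Bool) : Decidable (Spec_movement_population N L R grid out) := by unfold Spec_movement_population; infer_instance

-- ===== CLAIM (what is proved, stated in full; the proofs are below) =====
def Claim_equal_movement_population : Prop := ∀ (N : Int) (L : Int) (R : Int) (grid : List (List Int)), Dom_movement_population N L R grid → Pre_movement_population N L R grid → Spec_movement_population N L R grid (movement_population N L R grid)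

-- ===== LEMMAS AND PROOFS =====

-- a cell with both coordinates in [0, N)
def pvValid (N : Int) (s : Int × Int) : Prop :=
  0 ≤ s.1 ∧ s.1 < N ∧ 0 ≤ s.2 ∧ s.2 < N

-- the Prop behind pvQual
def pvQ (L R a b : Int) : Prop := L ≤ |b - a| ∧ |b - a| ≤ R

-- "some in-bounds 4-adjacent pair qualifies" — both ports compute `decide` of this
def pvE (N L R : Int) (grid : List (List Int)) : Prop :=
  ∃ s nb, pvValid N s ∧ nb ∈ pvIterNext N s ∧ pvQ L R (pvGetPop grid s) (pvGetPop grid nb)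

theorem pvMem_iterNext (N : Int) (s nb : Int × Int) :
    nb ∈ pvIterNext N s ↔ pvValid N nb ∧
      (nb = (s.1, s.2 + 1) ∨ nb = (s.1 + 1, s.2) ∨ nb = (s.1, s.2 - 1) ∨ nb = (s.1 - 1, s.2)) := by
  simp only [pvIterNext, pvDirs, List.mem_filterMap, List.mem_cons, List.not_mem_nil, or_false,
    pvValid]
  constructor
  · rintro ⟨d, hd, hf⟩
    rcases hd with rfl | rfl | rfl | rfl <;>
      (split at hf; · cases hf; simp [Prod.ext_iff] at *; omega
       · cases hf)
  · rintro ⟨hv, rfl | rfl | rfl | rfl⟩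
    · exact ⟨(0, 1), by simp, by simp at hv ⊢; omega⟩
    · exact ⟨(1, 0), by simp, by simp at hv ⊢; omega⟩
    · exact ⟨(0, -1), by simp, by simp at hv ⊢; omega⟩
    · exact ⟨(-1, 0), by simp, by simp at hv ⊢; omega⟩

theorem pvMem_product (N : Int) (x : Int × Int) : x ∈ pvProduct N ↔ pvValid N x := by
  simp only [pvProduct, List.mem_flatMap, List.mem_map, PySem.List.mem_pyRange_one, pvValid]
  constructor
  · rintro ⟨i, hi, j, hj, rfl⟩; exact ⟨hi.1, hi.2, hj.1, hj.2⟩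
  · rintro ⟨h1, h2, h3, h4⟩; exact ⟨x.1, ⟨h1, h2⟩, x.2, ⟨h3, h4⟩, by simp⟩

theorem pvQ_symm (L R a b : Int) (h : pvQ L R a b) : pvQ L R b a := by
  unfold pvQ at h ⊢; rw [abs_sub_comm]; exact h

theorem pvIterNext_symm (N : Int) (s nb : Int × Int) (hs : pvValid N s)
    (h : nb ∈ pvIterNext N s) : s ∈ pvIterNext N nb := by
  rw [pvMem_iterNext] at h
  rw [pvMem_iterNext]
  obtain ⟨hv, hc⟩ := h
  rcases hc with rfl | rfl | rfl | rfl <;> (simp [pvValid, Prod.ext_iff] at *) <;> omega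

theorem pvIterNext_ne (N : Int) (s nb : Int × Int) (h : nb ∈ pvIterNext N s) : nb ≠ s := by
  rcases ((pvMem_iterNext N s nb).mp h).2 with rfl | rfl | rfl | rfl <;>
    simp [Prod.ext_iff] <;> omega

-- invariants of the inner neighbour loop
theorem pvFold_inv (N L R : Int) (grid : List (List Int)) (curPop : Int) :
    ∀ (l : List (Int × Int)), (∀ x ∈ l, pvValid N x) →
    (∀ nb ∈ l, pvQ L R curPop (pvGetPop grid nb) → pvE N L R grid) →
    ∀ st, (let r := l.foldl (pvStep L R grid curPop) st;
      (∀ x ∈ st.2.1, x ∈ r.2.1) ∧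
      (∀ x ∈ st.2.2.1, x ∈ r.2.2.1) ∧
      (∀ x ∈ st.1, x ∈ r.1) ∧
      (∀ x ∈ r.1, x ∈ st.1 ∨ (x ∈ r.2.1 ∧ x ∈ r.2.2.1)) ∧
      (∀ x ∈ r.2.1, x ∈ st.2.1 ∨ (pvValid N x ∧ x ∈ r.2.2.1)) ∧
      (∀ x ∈ r.2.2.1, x ∈ st.2.2.1 ∨ x ∈ r.2.1) ∧
      (r = st ∨ pvE N L R grid) ∧
      (∀ nb ∈ l, pvQ L R curPop (pvGetPop grid nb) → nb ∈ r.2.1) ∧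
      (∀ x ∈ r.2.1, x ∈ st.2.1 ∨ x ∈ r.1)) := by
  intro l
  induction l with
  | nil =>
    intro _ _ st
    dsimp only [List.foldl_nil]
    refine ⟨fun _ h => h, fun _ h => h, fun _ h => h,
      fun _ h => Or.inl h, fun _ h => Or.inl h, fun _ h => Or.inl h,
      Or.inl rfl, ?_, fun _ h => Or.inl h⟩
    intro nb h
    cases h
  | cons a l ih =>
    intro hl hE st
    dsimp only [List.foldl_cons]
    by_cases hg : (!(PySem.Set.contains st.2.1 a) && pvQual L R curPop (pvGetPop grid a)) = true
    · have hna : a ∉ st.2.1 := by intro hmem; simp [hmem] at hg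
      have hq : pvQ L R curPop (pvGetPop grid a) := by
        unfold pvQ
        have h2 := ((Bool.and_eq_true _ _).mp hg).2
        unfold pvQual at h2
        exact of_decide_eq_true h2
      have hstep : pvStep L R grid curPop st a =
          (st.1 ++ [a], st.2.1 ++ [a], PySem.Set.add st.2.2.1 a,
            st.2.2.2 + pvGetPop grid a) := by
        unfold pvStep
        rw [if_pos hg, PySem.Set.add_of_not_mem hna]
      rw [hstep]
      obtain ⟨C1, C2, C3, C4, C5, C6, C7, C8, C9⟩ :=
        ih (fun x hx => hl x (List.mem_cons_of_mem a hx))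
           (fun nb hnb => hE nb (List.mem_cons_of_mem a hnb))
           (st.1 ++ [a], st.2.1 ++ [a], PySem.Set.add st.2.2.1 a,
             st.2.2.2 + pvGetPop grid a)
      have haVis := C1 a (List.mem_append_right _ (by simp))
      have haUni := C2 a ((PySem.Set.mem_add _ _ _).mpr (Or.inr rfl))
      refine ⟨?_, ?_, ?_, ?_, ?_, ?_, ?_, ?_, ?_⟩
      · exact fun x hx => C1 x (List.mem_append_left _ hx)
      · exact fun x hx => C2 x ((PySem.Set.mem_add _ _ _).mpr (Or.inl hx))
      · exact fun x hx => C3 x (List.mem_append_left _ hx)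
      · intro x hx
        rcases C4 x hx with hst1 | h
        · rcases List.mem_append.mp hst1 with h' | h'
          · exact Or.inl h'
          · simp at h'
            subst h'
            exact Or.inr ⟨haVis, haUni⟩
        · exact Or.inr h
      · intro x hx
        rcases C5 x hx with hst1 | h
        · rcases List.mem_append.mp hst1 with h' | h'
          · exact Or.inl h'
          · simp at h'
            subst h'
            exact Or.inr ⟨hl x List.mem_cons_self, haUni⟩
        · exact Or.inr h
      · intro x hx
        rcases C6 x hx with hst1 | h
        · rcases (PySem.Set.mem_add _ _ _).mp hst1 with h' | h'
          · exact Or.inl h'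
          · subst h'
            exact Or.inr haVis
        · exact Or.inr h
      · exact Or.inr (hE a List.mem_cons_self hq)
      · intro nb hnb hqnb
        rcases List.mem_cons.mp hnb with rfl | hnb'
        · exact haVis
        · exact C8 nb hnb' hqnb
      · intro x hx
        rcases C9 x hx with hst1 | h
        · rcases List.mem_append.mp hst1 with h' | h'
          · exact Or.inl h'
          · simp at h'
            subst h'
            exact Or.inr (C3 x (List.mem_append_right _ (by simp)))
        · exact Or.inr h
    · have hstep : pvStep L R grid curPop st a = st := by
        unfold pvStep
        rw [if_neg hg]
      rw [hstep]
      obtain ⟨C1, C2, C3, C4, C5, C6, C7, C8, C9⟩ :=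
        ih (fun x hx => hl x (List.mem_cons_of_mem a hx))
           (fun nb hnb => hE nb (List.mem_cons_of_mem a hnb)) st
      refine ⟨C1, C2, C3, C4, C5, C6, C7, ?_, C9⟩
      intro nb hnb hqnb
      rcases List.mem_cons.mp hnb with rfl | hnb'
      · have hq1 : pvQual L R curPop (pvGetPop grid nb) = true := by
          unfold pvQual
          unfold pvQ at hqnb
          exact decide_eq_true hqnb
        have hc : nb ∈ st.2.1 := by
          by_contra hna
          exact hg (by simp [hq1, hna])
        exact C1 nb hc
      · exact C8 nb hnb' hqnb

-- invariants of the `while stack:` loop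
theorem pvDfs_inv (N L R : Int) (grid : List (List Int)) :
    ∀ (n : Nat) (stack visited union : List (Int × Int)) (upop : Int),
    pvMu N stack visited ≤ n →
    (∀ x ∈ stack, x ∈ visited) →
    (∀ x ∈ visited, pvValid N x) →
    (∀ s ∈ visited, s ∉ stack → ∀ nb ∈ pvIterNext N s,
        pvQ L R (pvGetPop grid s) (pvGetPop grid nb) → nb ∈ visited) →
    (∀ x ∈ union, x ∈ visited) →
    (let r := pvDfs N L R grid stack visited union upop;
      (∀ x ∈ visited, x ∈ r.1) ∧
      (∀ x ∈ r.1, pvValid N x) ∧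
      (∀ s ∈ r.1, ∀ nb ∈ pvIterNext N s,
          pvQ L R (pvGetPop grid s) (pvGetPop grid nb) → nb ∈ r.1) ∧
      (r.2.1 = union ∨ pvE N L R grid) ∧
      (∀ x ∈ r.1, x ∈ visited ∨ x ∈ r.2.1) ∧
      (∀ x ∈ union, x ∈ r.2.1)) := by
  intro n
  induction n using Nat.strong_induction_on with
  | _ n IH =>
    intro stack visited union upop hmu H1 H2 H3 H4
    by_cases h : stack = []
    · subst h
      rw [pvDfs, dif_pos rfl]
      exact ⟨fun _ hx => hx, H2,
        fun s hs nb hnb hq => H3 s hs (by simp) nb hnb hq,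
        Or.inl rfl, fun x hx => Or.inl hx, fun _ hx => hx⟩
    · rw [pvDfs, dif_neg h]
      dsimp only
      have hcurv : stack.getLast h ∈ visited := H1 _ (List.getLast_mem h)
      have hcval : pvValid N (stack.getLast h) := H2 _ hcurv
      obtain ⟨C1, C2, C3, C4, C5, C6, C7, C8, C9⟩ :=
        pvFold_inv N L R grid (pvGetPop grid (stack.getLast h)) (pvIterNext N (stack.getLast h))
          (fun x hx => ((pvMem_iterNext N _ x).mp hx).1)
          (fun nb hnb hq => ⟨stack.getLast h, nb, hcval, hnb, hq⟩)
          (stack.dropLast, visited, union, upop)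
      have hrestsub : ∀ x ∈ stack.dropLast, x ∈ stack :=
        fun x hx => (List.dropLast_sublist (l := stack)).subset hx
      have hdecomp : stack.dropLast ++ [stack.getLast h] = stack :=
        List.dropLast_concat_getLast h
      -- abbreviate the fold result
      set st := (pvIterNext N (stack.getLast h)).foldl
        (pvStep L R grid (pvGetPop grid (stack.getLast h)))
        (stack.dropLast, visited, union, upop) with hst
      have H1' : ∀ x ∈ st.1, x ∈ st.2.1 := by
        intro x hx
        rcases C4 x hx with hrest | hnew
        · exact C1 x (H1 x (hrestsub x hrest))
        · exact hnew.1
      have H2' : ∀ x ∈ st.2.1, pvValid N x := by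
        intro x hx
        rcases C5 x hx with hv | hnew
        · exact H2 x hv
        · exact hnew.1
      have H3' : ∀ s ∈ st.2.1, s ∉ st.1 → ∀ nb ∈ pvIterNext N s,
          pvQ L R (pvGetPop grid s) (pvGetPop grid nb) → nb ∈ st.2.1 := by
        intro s hs hns nb hnb hq
        have hsv : s ∈ visited := by
          rcases C9 s hs with hv | hstk
          · exact hv
          · exact absurd hstk hns
        by_cases hsc : s = stack.getLast h
        · subst hsc
          exact C8 nb hnb hq
        · have hnst : s ∉ stack := by
            intro hmem
            rw [← hdecomp] at hmem
            rcases List.mem_append.mp hmem with h' | h'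
            · exact hns (C3 s h')
            · simp at h'
              exact hsc h'
          exact C1 nb (H3 s hsv hnst nb hnb hq)
      have H4' : ∀ x ∈ st.2.2.1, x ∈ st.2.1 := by
        intro x hx
        rcases C6 x hx with hu | hv
        · exact C1 x (H4 x hu)
        · exact hv
      have hsub : ∀ x ∈ pvIterNext N (stack.getLast h), x ∈ pvProduct N :=
        fun x hx => (pvMem_product N x).mpr ((pvMem_iterNext N _ x).mp hx).1
      have hmu2 := pvFold_mu N L R grid (pvGetPop grid (stack.getLast h))
        (pvIterNext N (stack.getLast h)) hsub (stack.dropLast, visited, union, upop)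
      rw [← hst] at hmu2
      have hlen : stack.dropLast.length + 1 = stack.length := by
        have hpos : 0 < stack.length := List.length_pos_iff.mpr h
        simp only [List.length_dropLast]
        omega
      have hlt : pvMu N st.1 st.2.1 < n := by
        have : pvMu N stack.dropLast visited < pvMu N stack visited := by
          unfold pvMu
          omega
        calc pvMu N st.1 st.2.1 ≤ pvMu N stack.dropLast visited := hmu2
          _ < pvMu N stack visited := this
          _ ≤ n := hmu
      obtain ⟨D1, D2, D3, D4, D5, D6⟩ :=
        IH (pvMu N st.1 st.2.1) hlt st.1 st.2.1 st.2.2.1 st.2.2.2 (le_refl _) H1' H2' H3' H4'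
      refine ⟨fun x hx => D1 x (C1 x hx), D2, D3, ?_, ?_, fun x hx => D6 x (C2 x hx)⟩
      · rcases D4 with he | hD
        · rcases C7 with heq | hC
          · left
            rw [he, congrArg (fun t => t.2.2.1) heq]
          · exact Or.inr hC
        · exact Or.inr hD
      · intro x hx
        rcases D5 x hx with hst | hu
        · rcases C5 x hst with hv | hnew
          · exact Or.inl hv
          · exact Or.inr (D6 x hnew.2)
        · exact Or.inr hu

-- invariants of the outer scan over product(range(N), range(N))
theorem pvScan_inv (N L R : Int) (grid : List (List Int)) :
    ∀ (l : List (Int × Int)), (∀ x ∈ l, pvValid N x) →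
    ∀ (vis : PySem.Set (Int × Int)) (moved : Bool),
    (∀ x ∈ vis, pvValid N x) →
    (∀ s ∈ vis, ∀ nb ∈ pvIterNext N s,
        pvQ L R (pvGetPop grid s) (pvGetPop grid nb) → nb ∈ vis) →
    (moved = false → ∀ s ∈ vis, ∀ nb ∈ pvIterNext N s, nb ∈ vis →
        ¬ pvQ L R (pvGetPop grid s) (pvGetPop grid nb)) →
    (moved = true → pvE N L R grid) →
    (let r := l.foldl
        (fun (st : PySem.Set (Int × Int) × Bool) s =>
          if !(PySem.Set.contains st.1 s) then
            let u := pvUnionWith N L R grid st.1 s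
            (u.1, u.2 || st.2)
          else st) (vis, moved);
      (∀ x ∈ vis, x ∈ r.1) ∧
      (∀ x ∈ l, x ∈ r.1) ∧
      (r.2 = false → ∀ s ∈ r.1, ∀ nb ∈ pvIterNext N s, nb ∈ r.1 →
          ¬ pvQ L R (pvGetPop grid s) (pvGetPop grid nb)) ∧
      (r.2 = true → pvE N L R grid)) := by
  intro l
  induction l with
  | nil =>
    intro _ vis moved _ _ hmf hmt
    dsimp only [List.foldl_nil]
    refine ⟨fun _ hx => hx, ?_, hmf, hmt⟩
    intro x hx
    cases hx
  | cons s l ih =>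
    intro hl vis moved hval hclosed hmf hmt
    dsimp only [List.foldl_cons]
    by_cases hc : s ∈ vis
    · rw [if_neg (by simp [hc])]
      obtain ⟨K0, K1, K2, K3⟩ :=
        ih (fun x hx => hl x (List.mem_cons_of_mem s hx)) vis moved hval hclosed hmf hmt
      refine ⟨K0, ?_, K2, K3⟩
      intro x hx
      rcases List.mem_cons.mp hx with rfl | hx'
      · exact K0 x hc
      · exact K1 x hx'
    · rw [if_pos (by simp [hc])]
      have hsval : pvValid N s := hl s List.mem_cons_self
      have hadd : PySem.Set.add vis s = vis ++ [s] := PySem.Set.add_of_not_mem hc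
      have hofl : PySem.Set.ofList [s] = [s] := rfl
      unfold pvUnionWith
      dsimp only
      rw [hadd, hofl]
      obtain ⟨D1, D2, D3, D4, D5, D6⟩ :=
        pvDfs_inv N L R grid (pvMu N [s] (vis ++ [s])) [s] (vis ++ [s]) [s] (pvGetPop grid s)
          (le_refl _)
          (fun x hx => by simp at hx; subst hx; exact List.mem_append_right _ (by simp))
          (by
            intro x hx
            rcases List.mem_append.mp hx with h' | h'
            · exact hval x h'
            · simp at h'; subst h'; exact hsval)
          (by
            intro t ht hnt nb hnb hq
            have htv : t ∈ vis := by
              rcases List.mem_append.mp ht with h' | h'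
              · exact h'
              · simp at h'; exact absurd (by simp [h'] : t ∈ [s]) hnt
            exact List.mem_append_left _ (hclosed t htv nb hnb hq))
          (fun x hx => List.mem_append_right _ hx)
      set d := pvDfs N L R grid [s] (vis ++ [s]) [s] (pvGetPop grid s) with hd
      have hvd : ∀ x ∈ vis, x ∈ d.1 := fun x hx => D1 x (List.mem_append_left _ hx)
      have hsd : s ∈ d.1 := D1 s (List.mem_append_right _ (by simp))
      have hmemd : ∀ x ∈ d.1, x ∈ vis ∨ x ∈ d.2.1 := by
        intro x hx
        rcases D5 x hx with h' | h'
        · rcases List.mem_append.mp h' with h'' | h''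
          · exact Or.inl h''
          · simp at h''; subst h''; exact Or.inr (D6 x (by simp))
        · exact Or.inr h'
      obtain ⟨K0, K1, K2, K3⟩ :=
        ih (fun x hx => hl x (List.mem_cons_of_mem s hx)) d.1
          (decide (1 < d.2.1.length) || moved) D2 D3
          (by
            intro hm0
            have hmv : moved = false := by
              rcases Bool.or_eq_false_iff.mp hm0 with ⟨_, h2⟩
              exact h2
            have hlen1 : ¬ 1 < d.2.1.length := by
              rcases Bool.or_eq_false_iff.mp hm0 with ⟨h1, _⟩
              simpa using h1
            have hsingle : ∀ x ∈ d.2.1, x = s := by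
              intro x hx
              have hs' : s ∈ d.2.1 := D6 s (by simp)
              cases hll : d.2.1 with
              | nil => rw [hll] at hx; cases hx
              | cons a t =>
                have ht0 : t = [] := by
                  rw [hll] at hlen1
                  simp only [List.length_cons] at hlen1
                  exact List.eq_nil_of_length_eq_zero (by omega)
                subst ht0
                rw [hll] at hx hs'
                simp at hx hs'
                rw [hx, hs']
            have hne := hmf hmv
            intro s1 hs1 nb hnb hnbm hq
            have h1 : s1 ∈ vis ∨ s1 = s := by
              rcases hmemd s1 hs1 with h' | h'
              · exact Or.inl h'
              · exact Or.inr (hsingle s1 h')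
            have h2 : nb ∈ vis ∨ nb = s := by
              rcases hmemd nb hnbm with h' | h'
              · exact Or.inl h'
              · exact Or.inr (hsingle nb h')
            rcases h1 with h1v | h1s
            · rcases h2 with h2v | h2s
              · exact hne s1 h1v nb hnb h2v hq
              · exact hc (h2s ▸ hclosed s1 h1v nb hnb hq)
            · rcases h2 with h2v | h2s
              · rw [h1s] at hnb hq
                have hsym := pvIterNext_symm N s nb hsval hnb
                exact hc (hclosed nb h2v s hsym (pvQ_symm _ _ _ _ hq))
              · exact (pvIterNext_ne N s1 nb hnb) (h2s.trans h1s.symm)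
          )
          (by
            intro hm1
            rcases Bool.or_eq_true_iff.mp hm1 with h1 | h2
            · have hgt : 1 < d.2.1.length := by simpa using h1
              rcases D4 with he | hE'
              · rw [he] at hgt; simp at hgt
              · exact hE'
            · exact hmt h2)
      refine ⟨fun x hx => K0 x (hvd x hx), ?_, K2, K3⟩
      intro x hx
      rcases List.mem_cons.mp hx with rfl | hx'
      · exact K0 x hsd
      · exact K1 x hx'

theorem pvA_iff (N L R : Int) (grid : List (List Int)) :
    movement_population N L R grid = true ↔ pvE N L R grid := by
  unfold movement_population
  obtain ⟨K0, K1, K2, K3⟩ := pvScan_inv N L R grid (pvProduct N)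
    (fun x hx => (pvMem_product N x).mp hx) PySem.Set.empty false
    (by intro x hx; cases hx)
    (by intro t ht; cases ht)
    (by intro _ t ht; cases ht)
    (fun h => nomatch h)
  constructor
  · exact K3
  · intro hE
    by_contra hf
    rw [Bool.not_eq_true] at hf
    obtain ⟨sp, nb, hs, hnb, hq⟩ := hE
    exact K2 hf sp (K1 sp ((pvMem_product N sp).mpr hs)) nb hnb
      (K1 nb ((pvMem_product N nb).mpr ((pvMem_iterNext N sp nb).mp hnb).1)) hq

theorem pvB_iff (N L R : Int) (grid : List (List Int)) :
    movement_population_alt N L R grid = true ↔ pvE N L R grid := by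
  unfold movement_population_alt
  simp only [List.any_eq_true, PySem.List.mem_pyRange_one, Bool.or_eq_true, Bool.and_eq_true,
    decide_eq_true_eq]
  constructor
  · rintro ⟨i, ⟨hi0, hiN⟩, j, ⟨hj0, hjN⟩, ⟨hjn, hq1, hq2⟩ | ⟨hin, hq1, hq2⟩⟩
    · refine ⟨(i, j), (i, j + 1), ⟨hi0, hiN, hj0, hjN⟩, ?_, ?_⟩
      · exact (pvMem_iterNext N (i, j) (i, j + 1)).mpr
          ⟨⟨hi0, hiN, by omega, hjn⟩, Or.inl rfl⟩
      · exact ⟨hq1, hq2⟩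
    · refine ⟨(i, j), (i + 1, j), ⟨hi0, hiN, hj0, hjN⟩, ?_, ?_⟩
      · exact (pvMem_iterNext N (i, j) (i + 1, j)).mpr
          ⟨⟨by omega, hin, hj0, hjN⟩, Or.inr (Or.inl rfl)⟩
      · exact ⟨hq1, hq2⟩
  · rintro ⟨sp, nb, hs, hnb, hq⟩
    unfold pvQ at hq
    obtain ⟨hq1, hq2⟩ := hq
    obtain ⟨hs1, hs2, hs3, hs4⟩ := hs
    obtain ⟨hnbv, hcase⟩ := (pvMem_iterNext N sp nb).mp hnb
    obtain ⟨hv1, hv2, hv3, hv4⟩ := hnbv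
    rcases hcase with rfl | rfl | rfl | rfl
    · exact ⟨sp.1, ⟨hs1, hs2⟩, sp.2, ⟨hs3, hs4⟩, Or.inl ⟨by simpa using hv4, hq1, hq2⟩⟩
    · exact ⟨sp.1, ⟨hs1, hs2⟩, sp.2, ⟨hs3, hs4⟩, Or.inr ⟨by simpa using hv2, hq1, hq2⟩⟩
    · refine ⟨sp.1, ⟨hs1, hs2⟩, sp.2 - 1, ⟨by simpa using hv3, by omega⟩, Or.inl ⟨by omega, ?_, ?_⟩⟩
      · have e : sp.2 - 1 + 1 = sp.2 := by omega
        rw [e]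
        exact (pvQ_symm L R _ _ ⟨hq1, hq2⟩).1
      · have e : sp.2 - 1 + 1 = sp.2 := by omega
        rw [e]
        exact (pvQ_symm L R _ _ ⟨hq1, hq2⟩).2
    · refine ⟨sp.1 - 1, ⟨by simpa using hv1, by omega⟩, sp.2, ⟨hs3, hs4⟩, Or.inr ⟨by omega, ?_, ?_⟩⟩
      · have e : sp.1 - 1 + 1 = sp.1 := by omega
        rw [e]
        exact (pvQ_symm L R _ _ ⟨hq1, hq2⟩).1
      · have e : sp.1 - 1 + 1 = sp.1 := by omega
        rw [e]
        exact (pvQ_symm L R _ _ ⟨hq1, hq2⟩).2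

-- ===== VERDICT (by name: the statement is the Claim_ definition above) =====
theorem movement_population_spec : Claim_equal_movement_population := by
  intro N L R grid _ _
  unfold Spec_movement_population
  have ha := pvA_iff N L R grid
  have hb := pvB_iff N L R grid
  cases h : movement_population_alt N L R grid
  · cases h2 : movement_population N L R grid
    · rfl
    · rw [h2] at ha; rw [h] at hb; simp at ha hb; exact absurd ha hb
  · rw [h] at hb; simp at hb
    rw [← ha] at hb; exact hb
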